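-- pv_equiv track=rewrite | github.com/ss-di/1580-2022-EGE-17-Treacher | 2023_03_28 - Task 23/t23z1r4.py | calc
-- ===== SOURCE A (Python) =====
-- def calc(f, t):
--     if t < f:
--         return 0
--     if t == f:
--         return 1
--     if t % 3 == 0:
--         return calc(f, t - 1) + calc(f, t // 3)
--     return calc(f, t - 1)
-- ===== SOURCE B (Python) =====
-- def calc(f, t):
--     # Bottom-up DP: ways[x - f] = number of paths from f to x, filled once for x = f+1 .. t.
--     if t < f:
--         return 0
--     if t == f:
--         return 1
--     ways = [1]
--     for x in range(f + 1, t + 1):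
--         w = ways[x - 1 - f]
--         if x % 3 == 0 and x // 3 >= f:
--             w = w + ways[x // 3 - f]
--         ways.append(w)
--     return ways[t - f]
-- ===== Notes on version B (the rewrite author's own statement) =====
-- stated objective: faster
-- what changed: A's exponential top-down recursion (recomputing calc(f, t//3) subtrees) is replaced by a single bottom-up pass filling a list ways[x-f] for x = f..t, each value computed once from ways[x-1-f] and ways[x//3-f].
import Mathlib
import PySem

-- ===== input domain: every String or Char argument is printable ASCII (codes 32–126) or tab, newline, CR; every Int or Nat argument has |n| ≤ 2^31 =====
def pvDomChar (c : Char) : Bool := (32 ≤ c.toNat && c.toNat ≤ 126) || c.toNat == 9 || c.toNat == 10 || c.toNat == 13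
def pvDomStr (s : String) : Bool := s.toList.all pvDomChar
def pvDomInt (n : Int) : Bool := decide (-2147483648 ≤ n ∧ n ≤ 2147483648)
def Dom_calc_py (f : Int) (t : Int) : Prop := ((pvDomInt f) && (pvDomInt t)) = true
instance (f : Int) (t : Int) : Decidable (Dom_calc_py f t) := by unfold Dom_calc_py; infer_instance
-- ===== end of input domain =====

-- B replaces A's exponential recursion by a bottom-up DP list over f..t (asymptotically faster).


-- ===== PORT A =====
-- Literal transliteration of A's recursion. A does not terminate on every Int input (outside
-- Pre_ the Python recurses forever and raises RecursionError), so the t // 3 call carries the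
-- totality guard 'if 0 < t': on every input of Pre_ (all inputs where the Python A returns)
-- the branch 't % 3 == 0' implies 0 < t (proved in calc_py_spec's lemmas), so the guard never
-- fires there and the port is A's code step for step.
def calc_py (f : Int) (t : Int) : Int :=
  if t < f then 0
  else if t = f then 1
  else if PySem.Int.mod t 3 = 0 then
    calc_py f (t - 1) + (if 0 < t then calc_py f (PySem.Int.floordiv t 3) else 0)
  else calc_py f (t - 1)
termination_by (t - f).toNat
decreasing_by
  · omega
  · rw [PySem.Int.floordiv_eq_ediv_of_pos (by norm_num)]; omega
  · omega

-- ===== PORT B =====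
-- loop body of B: w = ways[x-1-f]; if x % 3 == 0 and x // 3 >= f: w = w + ways[x//3-f]; ways.append(w)
-- (both list reads are in range whenever this step runs, so getD is exact for Python's ways[i])
def calcB_step (f : Int) (ways : Array Int) (x : Int) : Array Int :=
  ways.push (if PySem.Int.mod x 3 = 0 ∧ f ≤ PySem.Int.floordiv x 3
             then ways.getD (x - 1 - f).toNat 0 + ways.getD (PySem.Int.floordiv x 3 - f).toNat 0
             else ways.getD (x - 1 - f).toNat 0)

def calc_py_alt (f : Int) (t : Int) : Int :=
  if t < f then 0
  else if t = f then 1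
  else
    let ways := (PySem.List.pyRange (f + 1) (t + 1) 1).foldl (calcB_step f) #[1]
    -- ways[t - f]: the list has exactly t - f + 1 entries here, so the read is in range
    ways.getD (t - f).toNat 0

-- ===== PRECONDITION & SPEC =====
-- Pre_ excludes exactly the inputs on which A's recursion never terminates (Python raises
-- RecursionError): f < 0 and f < t with a multiple of 3 inside the interval (f, t].
-- A returns on every input satisfying Pre_; no input on which A returns is excluded.
def Pre_calc_py (f : Int) (t : Int) : Prop :=
  t ≤ f ∨ 0 ≤ f ∨ PySem.Int.floordiv f 3 = PySem.Int.floordiv t 3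
instance (f : Int) (t : Int) : Decidable (Pre_calc_py f t) := by unfold Pre_calc_py; infer_instance
def pvWitness_calc_py : Int × Int := (0, 12)

def Spec_calc_py (f : Int) (t : Int) (out : Int) : Prop := out = calc_py_alt f t
instance (f : Int) (t : Int) (out : Int) : Decidable (Spec_calc_py f t out) := by unfold Spec_calc_py; infer_instance

-- ===== CLAIM (what is proved, stated in full; the proofs are below) =====
def Claim_equal_calc_py : Prop := ∀ (f : Int) (t : Int), Dom_calc_py f t → Pre_calc_py f t → Spec_calc_py f t (calc_py f t)

-- ===== LEMMAS AND PROOFS =====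

lemma calcA_low (f m : Int) (h : m < f) : calc_py f m = 0 := by rw [calc_py]; simp [h]

lemma calcA_self (f : Int) : calc_py f f = 1 := by rw [calc_py]; simp

lemma calcA_step_div (f x : Int) (hfx : f < x) (hx0 : 0 < x) (h3 : PySem.Int.mod x 3 = 0) :
    calc_py f x = calc_py f (x - 1) + calc_py f (PySem.Int.floordiv x 3) := by
  rw [calc_py, if_neg (show ¬ x < f from by omega), if_neg (show ¬ x = f from by omega),
      if_pos h3, if_pos hx0]

lemma calcA_step_ndiv (f x : Int) (hfx : f < x) (h3 : ¬ PySem.Int.mod x 3 = 0) :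
    calc_py f x = calc_py f (x - 1) := by
  rw [calc_py, if_neg (show ¬ x < f from by omega), if_neg (show ¬ x = f from by omega),
      if_neg h3]

-- under Pre_, the branch 't % 3 == 0' can only be taken at a positive t (so A's t // 3 call,
-- and the guard in the port, is only ever reached with 0 < t)
lemma pos_of_mod3 (f t x : Int) (hPre : 0 ≤ f ∨ f / 3 = t / 3) (hfx : f < x) (hxt : x ≤ t)
    (h3 : PySem.Int.mod x 3 = 0) : 0 < x := by
  rw [PySem.Int.mod_eq_emod_of_pos (by norm_num)] at h3
  rcases hPre with hf | hfl
  · omega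
  · omega

lemma getD_push_lt (a : Array Int) (w : Int) (i : Nat) (h : i < a.size) :
    (a.push w).getD i 0 = a.getD i 0 := by
  simp [Array.getD, h, Nat.lt_succ_of_lt h, Array.getElem_push_lt]

lemma getD_push_eq (a : Array Int) (w : Int) : (a.push w).getD a.size 0 = w := by
  simp [Array.getD]

-- B's loop invariant: after processing f+1 .. x, ways has x-f+1 entries and
-- ways[m-f] is A's value at m for every f ≤ m ≤ x.
lemma foldB_inv (f t : Int) (hPre : 0 ≤ f ∨ f / 3 = t / 3) :
    ∀ (n : Nat) (x : Int), x = f + n → x ≤ t →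
      ((PySem.List.pyRange (f + 1) (x + 1) 1).foldl (calcB_step f) #[1]).size
        = (x - f).toNat + 1 ∧
      ∀ m : Int, f ≤ m → m ≤ x →
        ((PySem.List.pyRange (f + 1) (x + 1) 1).foldl (calcB_step f) #[1]).getD
          (m - f).toNat 0 = calc_py f m := by
  intro n
  induction n with
  | zero =>
    intro x hx hxt
    rw [PySem.List.pyRange_one_eq_nil (by omega)]
    simp only [List.foldl_nil]
    refine ⟨by simp; omega, ?_⟩
    intro m hfm hmx
    have hm : m = f := by omega
    subst hm
    simp only [show (m - m).toNat = 0 from by omega]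
    rw [calcA_self]
    rfl
  | succ n ih =>
    intro x hx hxt
    have hfx : f < x := by omega
    rw [PySem.List.pyRange_one_succ_right (by omega : f + 1 ≤ x), List.foldl_append]
    simp only [List.foldl_cons, List.foldl_nil]
    obtain ⟨ihsize, ihval⟩ :
        ((PySem.List.pyRange (f + 1) x 1).foldl (calcB_step f) #[1]).size
          = (x - 1 - f).toNat + 1 ∧
        ∀ m : Int, f ≤ m → m ≤ x - 1 →
          ((PySem.List.pyRange (f + 1) x 1).foldl (calcB_step f) #[1]).getD
            (m - f).toNat 0 = calc_py f m := by
      have h := ih (x - 1) (by omega) (by omega)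
      rwa [show x - 1 + 1 = x from by omega] at h
    set A := (PySem.List.pyRange (f + 1) x 1).foldl (calcB_step f) #[1] with hA
    -- the value appended at step x is A's value at x
    have hw : calcB_step f A x = A.push (calc_py f x) := by
      unfold calcB_step
      congr 1
      have hprev : A.getD (x - 1 - f).toNat 0 = calc_py f (x - 1) := ihval (x - 1) (by omega) (by omega)
      by_cases h3 : PySem.Int.mod x 3 = 0
      · have hx0 : 0 < x := pos_of_mod3 f t x hPre hfx hxt h3
        have hdiv : PySem.Int.floordiv x 3 = x / 3 :=
          PySem.Int.floordiv_eq_ediv_of_pos (by norm_num)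
        by_cases hge : f ≤ PySem.Int.floordiv x 3
        · rw [if_pos ⟨h3, hge⟩, hprev,
              ihval (PySem.Int.floordiv x 3) hge (by rw [hdiv]; omega),
              calcA_step_div f x hfx hx0 h3]
        · rw [if_neg (fun h => hge h.2), hprev, calcA_step_div f x hfx hx0 h3,
              calcA_low f (PySem.Int.floordiv x 3) (by omega), add_zero]
      · rw [if_neg (fun h => h3 h.1), hprev, calcA_step_ndiv f x hfx h3]
    rw [hw]
    constructor
    · rw [Array.size_push, ihsize]; omega
    · intro m hfm hmx
      by_cases hm : m = x
      · subst hm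
        rw [show (m - f).toNat = A.size from by omega, getD_push_eq]
      · rw [getD_push_lt A _ (m - f).toNat (by omega), ihval m hfm (by omega)]

-- ===== VERDICT (by name: the statement is the Claim_ definition above) =====
theorem calc_py_spec : Claim_equal_calc_py := by
  intro f t _ hPre
  unfold Spec_calc_py calc_py_alt
  by_cases h1 : t < f
  · rw [if_pos h1, calcA_low f t h1]
  · by_cases h2 : t = f
    · rw [if_neg h1, if_pos h2, h2, calcA_self]
    · rw [if_neg h1, if_neg h2]
      have hft : f < t := by omega
      have hPre' : 0 ≤ f ∨ f / 3 = t / 3 := by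
        rcases hPre with h | h | h
        · omega
        · exact Or.inl h
        · right
          rw [PySem.Int.floordiv_eq_ediv_of_pos (by norm_num),
              PySem.Int.floordiv_eq_ediv_of_pos (by norm_num)] at h
          exact h
      have h := (foldB_inv f t hPre' (t - f).toNat t (by omega) (by omega)).2 t (by omega) (le_refl t)
      simp only at h
      rw [h]
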